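-- pv_equiv track=rewrite | github.com/i2hy7hivi-developer/reboot | chapter-9.py | analyze_list
-- ===== SOURCE A (Python) =====
-- def analyze_list(arr):
-- 	counts = {}
-- 	duplicates = set()
--
-- 	for num in arr:
-- 		if num in counts:
-- 			counts[num] += 1
-- 			duplicates.add(num)
-- 		else:
-- 			counts[num] = 1
--
-- 	return duplicates, counts
-- ===== SOURCE B (Python) =====
-- def analyze_list(arr):
-- 	counts = {}
-- 	for num in arr:
-- 		counts[num] = counts.get(num, 0) + 1
-- 	first = {}
-- 	for i, num in enumerate(arr):
-- 		first.setdefault(num, i)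
-- 	duplicates = {num for i, num in enumerate(arr) if first[num] != i}
-- 	return duplicates, counts
-- ===== Notes on version B (the rewrite author's own statement) =====
-- stated objective: alternative
-- what changed: Replaces the interleaved single-pass dict+set duplicate detection with a table-first-then-filter decomposition: one unconditional counting pass via counts.get(num,0)+1, a first-occurrence-index table built with setdefault, then duplicates derived as a separate set comprehension over the occurrences that are not first occurrences.
import Mathlib
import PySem

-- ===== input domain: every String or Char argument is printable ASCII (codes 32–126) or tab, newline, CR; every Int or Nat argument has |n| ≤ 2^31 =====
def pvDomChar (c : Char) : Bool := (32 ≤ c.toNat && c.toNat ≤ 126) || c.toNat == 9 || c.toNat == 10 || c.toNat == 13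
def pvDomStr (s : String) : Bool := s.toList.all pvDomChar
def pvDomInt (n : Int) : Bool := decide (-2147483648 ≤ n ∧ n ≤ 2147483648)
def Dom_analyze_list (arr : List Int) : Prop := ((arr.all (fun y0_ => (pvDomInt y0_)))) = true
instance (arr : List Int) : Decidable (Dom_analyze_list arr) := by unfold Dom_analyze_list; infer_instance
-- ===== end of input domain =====

-- B replaces A's interleaved single-pass dict+set duplicate detection with a
-- table-first-then-filter decomposition: an unconditional counting pass, a
-- first-occurrence-index table, then duplicates as a separate set comprehension;
-- alternative structure, no speed claim.

-- ===== PORT A =====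
def analyze_list (arr : List Int) : List Int × (List (Int × Int)) :=
  let st := arr.foldl
    (fun (st : PySem.Dict Int Int × PySem.Set Int) num =>
      if st.1.contains num then (st.1.modify num 0 (· + 1), st.2.add num)
      else (st.1.insert num 1, st.2))
    (PySem.Dict.empty, PySem.Set.empty)
  (st.2, st.1.items)

-- ===== PORT B =====
def analyze_list_alt (arr : List Int) : List Int × (List (Int × Int)) :=
  let counts := arr.foldl (fun d num => d.insert num (d.getD num 0 + 1)) PySem.Dict.empty
  let first : PySem.Dict Int Int := (PySem.List.enumerate arr 0).foldl
    (fun d q => d.setdefault q.2 q.1) PySem.Dict.empty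
  -- `first[num] != i`: num is always a key of `first` here (set by the previous loop),
  -- so Python's lookup never raises; modeled exactly as get? ≠ some i
  let duplicates := PySem.Set.ofList
    (((PySem.List.enumerate arr 0).filter
        (fun q => decide (first.get? q.2 ≠ some q.1))).map (·.2))
  (duplicates, counts.items)

-- ===== PRECONDITION & SPEC =====
def Spec_analyze_list (arr : List Int) (out : List Int × (List (Int × Int))) : Prop := out = analyze_list_alt arr
instance (arr : List Int) (out : List Int × (List (Int × Int))) : Decidable (Spec_analyze_list arr out) := by unfold Spec_analyze_list; infer_instance

-- ===== CLAIM (what is proved, stated in full; the proofs are below) =====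
def Claim_equal_analyze_list : Prop := ∀ (arr : List Int), Dom_analyze_list arr → Spec_analyze_list arr (analyze_list arr)

-- ===== LEMMAS AND PROOFS =====

/-- The sequence of elements A adds to `duplicates` while scanning `l`, having already
seen the prefix `p`: each occurrence of `l` that has an earlier occurrence. -/
def dupSeq (p l : List Int) : List Int :=
  match l with
  | [] => []
  | x :: xs => (if x ∈ p then [x] else []) ++ dupSeq (p ++ [x]) xs

/-- A's loop, started after the already-seen prefix `p` (so counts = counter p),
produces the counter of the whole list and adds exactly `dupSeq p l` to the set. -/
theorem analyze_list_foldA (l : List Int) : ∀ (p : List Int) (s : PySem.Set Int),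
    l.foldl
      (fun (st : PySem.Dict Int Int × PySem.Set Int) num =>
        if st.1.contains num then (st.1.modify num 0 (· + 1), st.2.add num)
        else (st.1.insert num 1, st.2))
      (PySem.Dict.counter p, s)
    = (PySem.Dict.counter (p ++ l), PySem.Set.update s (dupSeq p l)) := by
  induction l with
  | nil => intro p s; simp [dupSeq]
  | cons x xs ih =>
    intro p s
    simp only [List.foldl_cons, PySem.Dict.contains_counter, dupSeq]
    by_cases hx : x ∈ p
    · rw [if_pos (by simpa using hx)]
      rw [show (PySem.Dict.counter p).modify x 0 (· + 1) = PySem.Dict.counter (p ++ [x]) from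
        (PySem.Dict.counter_append_singleton p x).symm]
      rw [ih (p ++ [x]) (s.add x)]
      simp [PySem.Set.update, hx]
    · rw [if_neg (by simpa using hx)]
      have hc : (PySem.Dict.counter p).contains x = false := by
        simp [PySem.Dict.contains_counter, hx]
      rw [show (PySem.Dict.counter p).insert x 1 = PySem.Dict.counter (p ++ [x]) by
        rw [PySem.Dict.counter_append_singleton p x]
        simp [PySem.Dict.modify, PySem.Dict.getD_of_not_contains _ _ hc]]
      rw [ih (p ++ [x]) s]
      simp [PySem.Set.update, hx]

/-- A comprehension filtering positions whose element occurs in the preceding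
prefix yields exactly `dupSeq p l`. -/
theorem analyze_list_enumFilter (l : List Int) : ∀ (p : List Int),
    (((PySem.List.enumerate l ((p.length : Nat) : Int)).filter
        (fun q => decide (q.2 ∈ PySem.List.slice (p ++ l) (some 0) (some q.1)))).map (·.2))
    = dupSeq p l := by
  induction l with
  | nil => intro p; simp [PySem.List.enumerate, dupSeq]
  | cons x xs ih =>
    intro p
    rw [PySem.List.enumerate_cons, List.filter_cons]
    have hsl : PySem.List.slice (p ++ x :: xs) none (some ((p.length : Nat) : Int)) = p := by
      simp [PySem.List.slice_to_natCast]
    have htail : ((PySem.List.enumerate xs (((p.length : Nat) : Int) + 1)).filter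
        (fun q => decide (q.2 ∈ PySem.List.slice (p ++ x :: xs) none (some q.1)))).map (·.2)
        = dupSeq (p ++ [x]) xs := by
      have harr : p ++ x :: xs = (p ++ [x]) ++ xs := by simp
      have hoff : ((p.length : Nat) : Int) + 1 = (((p ++ [x]).length : Nat) : Int) := by simp
      rw [harr, hoff]
      exact ih (p ++ [x])
    by_cases hx : x ∈ p
    · simp [hx, dupSeq, hsl, htail]
    · simp [hx, dupSeq, hsl, htail]

/-- B's `setdefault` loop builds the first-occurrence-index table: starting from a
dict that is the table for the prefix `p`, it yields the table for `p ++ l`. -/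
theorem analyze_list_fget (l : List Int) : ∀ (p : List Int) (d : PySem.Dict Int Int),
    (∀ x, d.get? x = if x ∈ p then some ((List.idxOf x p : Nat) : Int) else none) →
    ∀ x, ((PySem.List.enumerate l ((p.length : Nat) : Int)).foldl
        (fun d q => d.setdefault q.2 q.1) d).get? x
      = if x ∈ p ++ l then some ((List.idxOf x (p ++ l) : Nat) : Int) else none := by
  induction l with
  | nil => intro p d hd x; simpa [PySem.List.enumerate] using hd x
  | cons y ys ih =>
    intro p d hd x
    rw [PySem.List.enumerate_cons, List.foldl_cons]
    have hd' : ∀ x, (d.setdefault y ((p.length : Nat) : Int)).get? x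
        = if x ∈ p ++ [y] then some ((List.idxOf x (p ++ [y]) : Nat) : Int) else none := by
      intro x
      by_cases hxy : x = y
      · subst hxy
        rw [PySem.Dict.get?_setdefault_self, hd x]
        by_cases hxp : x ∈ p
        · simp [hxp, List.idxOf_append_of_mem hxp]
        · simp only [hxp, if_false, Option.getD_none]
          rw [if_pos (by simp), List.idxOf_append, if_neg hxp]
          simp
      · rw [PySem.Dict.get?_setdefault_of_ne _ _ hxy, hd x]
        have hmem : x ∈ p ++ [y] ↔ x ∈ p := by simp [hxy]
        by_cases hxp : x ∈ p
        · simp [hxp, hmem, List.idxOf_append_of_mem hxp]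
        · simp [hxp, hmem]
    have hoff : ((p.length : Nat) : Int) + 1 = (((p ++ [y]).length : Nat) : Int) := by simp
    rw [hoff]
    simpa using ih (p ++ [y]) _ hd' x

/-- The first occurrence of `l[k]` is at index ≤ k. -/
theorem analyze_list_idxOf_le (l : List Int) (k : Nat) (hk : k < l.length) :
    List.idxOf l[k] l ≤ k := by
  have hmem : l[k] ∈ l.take (k+1) := by
    have h1 : (l.take (k+1))[k]'(by simp; omega) = l[k] := List.getElem_take
    exact h1 ▸ List.getElem_mem _
  have := (List.mem_take_iff_idxOf_lt (List.getElem_mem hk)).mp hmem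
  omega

/-- B's filter condition `first[arr[k]] != k` says exactly: `arr[k]` occurs earlier. -/
theorem analyze_list_cond_iff (arr : List Int) (k : Nat) (hk : k < arr.length)
    (F : PySem.Dict Int Int)
    (hF : ∀ x, F.get? x = if x ∈ arr then some ((List.idxOf x arr : Nat) : Int) else none) :
    (F.get? arr[k] ≠ some ((k : Nat) : Int)) ↔ arr[k] ∈ List.take k arr := by
  rw [hF, if_pos (List.getElem_mem hk)]
  constructor
  · intro h
    have hne : List.idxOf arr[k] arr ≠ k := by
      intro he; exact h (by rw [he])
    have hle := analyze_list_idxOf_le arr k hk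
    exact (List.mem_take_iff_idxOf_lt (List.getElem_mem hk)).mpr (by omega)
  · intro h he
    have h1 := (List.mem_take_iff_idxOf_lt (List.getElem_mem hk)).mp h
    have h2 : ((List.idxOf arr[k] arr : Nat) : Int) = (k : Int) :=
      Option.some.injEq _ _ ▸ (by exact_mod_cast congrArg id he)
    omega

-- ===== VERDICT (by name: the statement is the Claim_ definition above) =====
theorem analyze_list_spec : Claim_equal_analyze_list := by
  intro arr _
  unfold Spec_analyze_list analyze_list analyze_list_alt
  have hA := analyze_list_foldA arr [] PySem.Set.empty
  have e : PySem.Dict.counter ([] : List Int) = PySem.Dict.empty := rfl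
  rw [e, List.nil_append] at hA
  have hF := analyze_list_fget arr [] PySem.Dict.empty (by intro x; simp [PySem.Dict.get?_empty])
  simp only [List.nil_append, List.length_nil, Nat.cast_zero] at hF
  have hcong : List.filter
      (fun q => decide (((PySem.List.enumerate arr 0).foldl
          (fun d q => d.setdefault q.2 q.1) PySem.Dict.empty).get? q.2 ≠ some q.1))
      (PySem.List.enumerate arr 0)
      = List.filter (fun q => decide (q.2 ∈ PySem.List.slice arr (some 0) (some q.1)))
        (PySem.List.enumerate arr 0) := by
    apply List.filter_congr
    intro q hq
    rw [PySem.List.mem_enumerate_iff] at hq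
    obtain ⟨k, hk, rfl⟩ := hq
    simp only [zero_add, decide_eq_decide]
    rw [analyze_list_cond_iff arr k hk _ hF]
    simp [PySem.List.slice_to_natCast]
  have hB0 := analyze_list_enumFilter arr []
  simp only [List.length_nil, Nat.cast_zero, List.nil_append] at hB0
  have hB : (((PySem.List.enumerate arr 0).filter
      (fun q => decide (((PySem.List.enumerate arr 0).foldl
          (fun d q => d.setdefault q.2 q.1) PySem.Dict.empty).get? q.2 ≠ some q.1))).map (·.2))
      = dupSeq [] arr := by rw [hcong]; exact hB0
  simp only [hA, PySem.Dict.foldl_insert_getD_add_one_eq_counter]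
  have e2 : (PySem.Set.empty : PySem.Set Int) = ([] : PySem.Set Int) := rfl
  rw [e2, PySem.Set.update_nil_left]
  exact congrArg (fun l => (PySem.Set.ofList l, (PySem.Dict.counter arr).items)) hB.symm
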